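-- pv_equiv track=rewrite | github.com/smanicome/LDAFromScratch | main.py | sort_topics
-- ===== SOURCE A (Python) =====
-- import operator
--
-- topics = [i for i in range(20)]
--
-- def get_topic_distribution_in_list(doc):
-- 	topics_in_doc = {}
-- 	for t in topics:
-- 		topics_in_doc[t] = 0
--
-- 	for w in doc:
-- 		topics_in_doc[w[1]] += 1 * w[0][1]
-- 	return topics_in_doc
--
-- def sort_topics(docs):
-- 	flatlist = [item for sublist in docs for item in sublist]
--
-- 	doc_list = []
-- 	for doc in docs:
-- 		sublist = []
-- 		for word in doc:
-- 			topic_distribution_in_doc = get_topic_distribution_in_list(doc)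
-- 			corpus_word = list(filter(lambda item: item[0][0] == word[0][0], flatlist))
-- 			word_distribution_in_corpus = get_topic_distribution_in_list(corpus_word)
--
-- 			topics_weight = []
-- 			for t in topics:
-- 				weight = (topic_distribution_in_doc[t] + 1) * (word_distribution_in_corpus[t] + 1)
-- 				topics_weight.append((t, weight))
-- 			topic_selected = max(topics_weight, key=operator.itemgetter(1))
-- 			sublist.append((word[0], topic_selected[0]))
--
-- 		doc_list.append(sublist)
--
-- 	return doc_list
-- ===== SOURCE B (Python) =====
-- topics = [i for i in range(20)]
--
-- def sort_topics(docs):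
--     T = len(topics)
--     # one pass over the whole corpus: per (word id, topic) weighted counts
--     corpus = {}
--     for doc in docs:
--         for (wid, cnt), t in doc:
--             key = (wid, t)
--             corpus[key] = corpus.get(key, 0) + cnt
--
--     result = []
--     for doc in docs:
--         # per-doc topic distribution computed once per doc
--         dd = {}
--         for (wid, cnt), t in doc:
--             dd[t] = dd.get(t, 0) + cnt
--
--         sub = []
--         for (wid, cnt), t in doc:
--             best_t = 0
--             best_w = (dd.get(0, 0) + 1) * (corpus.get((wid, 0), 0) + 1)
--             for tt in range(1, T):
--                 w = (dd.get(tt, 0) + 1) * (corpus.get((wid, tt), 0) + 1)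
--                 if w > best_w:
--                     best_t, best_w = tt, w
--             sub.append(((wid, cnt), best_t))
--         result.append(sub)
--     return result
-- ===== Notes on version B (the rewrite author's own statement) =====
-- stated objective: faster
-- what changed: B precomputes one corpus-wide (word_id, topic)->count dict in a single pass and one per-doc topic distribution per document, then picks each word's topic by a linear argmax scan, instead of A's per-word re-filtering of the flattened corpus and per-word rebuilding of the doc distribution.
import Mathlib
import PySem

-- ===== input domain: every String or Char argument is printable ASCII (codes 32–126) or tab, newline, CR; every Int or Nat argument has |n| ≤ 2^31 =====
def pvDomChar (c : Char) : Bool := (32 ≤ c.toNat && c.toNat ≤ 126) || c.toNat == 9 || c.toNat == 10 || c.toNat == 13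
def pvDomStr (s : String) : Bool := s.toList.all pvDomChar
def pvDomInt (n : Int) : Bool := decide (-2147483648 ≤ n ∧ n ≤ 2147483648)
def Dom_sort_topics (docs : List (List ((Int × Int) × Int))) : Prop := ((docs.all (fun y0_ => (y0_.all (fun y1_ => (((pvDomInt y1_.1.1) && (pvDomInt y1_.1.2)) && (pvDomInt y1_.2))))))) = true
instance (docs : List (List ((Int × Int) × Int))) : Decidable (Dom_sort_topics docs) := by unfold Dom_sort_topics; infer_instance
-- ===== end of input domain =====

-- B replaces A's per-word corpus re-filter and per-word doc-distribution rebuild by one corpus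
-- (word id, topic) counting dict and one per-doc distribution, then a linear argmax scan (faster, asymptotic).
-- A word is ((id, count), topic).

-- ===== PORT A =====
-- topics = [i for i in range(20)]
def pyTopics : List Int := PySem.List.pyRange 0 20 1

-- get_topic_distribution_in_list; the lookup topics_in_doc[w[1]] raises KeyError when the key is
-- absent (Pre_ excludes exactly that); the `none` branch is that unreachable-under-Pre_ case.
def getTopicDistA (doc : List ((Int × Int) × Int)) : PySem.Dict Int Int :=
  let d0 := pyTopics.foldl (fun d t => d.insert t (0 : Int)) PySem.Dict.empty
  doc.foldl (fun d w =>
    match d.get? w.2 with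
    | some v => d.insert w.2 (v + 1 * w.1.2)
    | none => d) d0

def sort_topics (docs : List (List ((Int × Int) × Int))) : List (List ((Int × Int) × Int)) :=
  let flatlist := docs.flatten
  docs.foldl (fun doc_list doc =>
    doc_list ++ [doc.foldl (fun sublist word =>
      let tdd := getTopicDistA doc
      let corpus_word := flatlist.filter (fun item => item.1.1 == word.1.1)
      let wdc := getTopicDistA corpus_word
      let tw := pyTopics.foldl
        (fun acc t => acc ++ [(t, (tdd.getD t 0 + 1) * (wdc.getD t 0 + 1))])
        ([] : List (Int × Int))
      match PySem.List.max? tw (fun p => p.2) with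
      | some ts => sublist ++ [(word.1, ts.1)]
      | none => sublist) []]) []

-- ===== PORT B =====
def sort_topics_alt (docs : List (List ((Int × Int) × Int))) : List (List ((Int × Int) × Int)) :=
  let corpus := docs.foldl (fun d doc =>
      doc.foldl (fun d w => d.insert (w.1.1, w.2) (d.getD (w.1.1, w.2) 0 + w.1.2)) d)
    PySem.Dict.empty
  docs.foldl (fun result doc =>
    let dd := doc.foldl (fun d w => d.insert w.2 (d.getD w.2 0 + w.1.2)) PySem.Dict.empty
    let sub := doc.foldl (fun sub w =>
      let best := (PySem.List.pyRange 1 20 1).foldl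
        (fun (b : Int × Int) tt =>
          let wt := (dd.getD tt 0 + 1) * (corpus.getD (w.1.1, tt) 0 + 1)
          if wt > b.2 then (tt, wt) else b)
        (0, (dd.getD 0 0 + 1) * (corpus.getD (w.1.1, 0) 0 + 1))
      sub ++ [(w.1, best.1)]) []
    result ++ [sub]) []

-- ===== PRECONDITION & SPEC =====
-- A raises KeyError on a word whose topic is not in 0..19; Pre_ excludes exactly those inputs.
def Pre_sort_topics (docs : List (List ((Int × Int) × Int))) : Prop :=
  ∀ doc ∈ docs, ∀ w ∈ doc, 0 ≤ w.2 ∧ w.2 < 20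
instance (docs : List (List ((Int × Int) × Int))) : Decidable (Pre_sort_topics docs) := by
  unfold Pre_sort_topics; infer_instance

def pvWitness_sort_topics : (List (List ((Int × Int) × Int))) := [[((1, 2), 3)]]

def Spec_sort_topics (docs : List (List ((Int × Int) × Int))) (out : List (List ((Int × Int) × Int))) : Prop := out = sort_topics_alt docs
instance (docs : List (List ((Int × Int) × Int))) (out : List (List ((Int × Int) × Int))) : Decidable (Spec_sort_topics docs out) := by unfold Spec_sort_topics; infer_instance

-- ===== CLAIM (what is proved, stated in full; the proofs are below) =====
def Claim_equal_sort_topics : Prop := ∀ (docs : List (List ((Int × Int) × Int))), Dom_sort_topics docs → Pre_sort_topics docs → Spec_sort_topics docs (sort_topics docs)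

-- ===== LEMMAS AND PROOFS =====

-- weighted count of topic t in a word list: the distribution value both programs compute
def wsum (l : List ((Int × Int) × Int)) (t : Int) : Int :=
  ((l.filter (fun w => w.2 == t)).map (fun w => w.1.2)).sum

theorem wsum_cons (w : (Int × Int) × Int) (l : List ((Int × Int) × Int)) (t : Int) :
    wsum (w :: l) t = (if w.2 = t then w.1.2 else 0) + wsum l t := by
  by_cases h : w.2 = t <;> simp [wsum, h]

theorem dict_get?_of_contains {κ : Type} [BEq κ] (d : PySem.Dict κ Int) (k : κ)
    (h : d.contains k = true) : d.get? k = some (d.getD k 0) := by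
  have h' := h
  rw [PySem.Dict.contains] at h'
  have h2 : (List.find? (fun p => p.1 == k) d.items).isSome := by
    rw [List.find?_isSome]; simpa using h' 
  cases hf : List.find? (fun p => p.1 == k) d.items with
  | none => rw [hf] at h2; simp at h2
  | some v => simp [PySem.Dict.get?, PySem.Dict.getD, hf]

-- B's per-doc distribution fold
theorem foldB_getD (l : List ((Int × Int) × Int)) :
    ∀ (d : PySem.Dict Int Int) (t : Int),
      (l.foldl (fun d w => d.insert w.2 (d.getD w.2 0 + w.1.2)) d).getD t 0
        = d.getD t 0 + wsum l t := by
  induction l with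
  | nil => intro d t; simp [wsum]
  | cons w l ih =>
    intro d t
    rw [List.foldl_cons, ih, PySem.Dict.getD_insert, wsum_cons]
    by_cases h : t = w.2
    · simp [h, eq_comm]; ring
    · have h' : ¬ w.2 = t := fun e => h e.symm
      simp [h, h']

-- B's corpus fold
theorem foldC_getD (l : List ((Int × Int) × Int)) :
    ∀ (d : PySem.Dict (Int × Int) Int) (x t : Int),
      (l.foldl (fun d w => d.insert (w.1.1, w.2) (d.getD (w.1.1, w.2) 0 + w.1.2)) d).getD (x, t) 0
        = d.getD (x, t) 0 + wsum (l.filter (fun w => w.1.1 == x)) t := by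
  induction l with
  | nil => intro d x t; simp [wsum]
  | cons w l ih =>
    intro d x t
    rw [List.foldl_cons, ih, PySem.Dict.getD_insert, List.filter_cons]
    by_cases hx : w.1.1 = x
    · by_cases ht : w.2 = t
      · simp [hx, ht, wsum_cons]; ring
      · simp [hx, wsum_cons, ht]
        intro h; exact absurd h.symm ht
    · have hne : ¬ ((x, t) = (w.1.1, w.2)) := by
        intro e; exact absurd (congrArg Prod.fst e).symm hx
      simp [hx, hne]

-- A's distribution fold, over a dict already containing every topic key of l
theorem foldA_getD (l : List ((Int × Int) × Int)) :
    ∀ (d : PySem.Dict Int Int), (∀ w ∈ l, d.contains w.2 = true) → ∀ (t : Int),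
      (l.foldl (fun d w =>
        match d.get? w.2 with
        | some v => d.insert w.2 (v + 1 * w.1.2)
        | none => d) d).getD t 0
        = d.getD t 0 + wsum l t := by
  induction l with
  | nil => intro d _ t; simp [wsum]
  | cons w l ih =>
    intro d hc t
    rw [List.foldl_cons]
    rw [dict_get?_of_contains d w.2 (hc w (List.mem_cons_self))]
    have hc' : ∀ w' ∈ l, (d.insert w.2 (d.getD w.2 0 + 1 * w.1.2)).contains w'.2 = true := by
      intro w' hw'
      rw [PySem.Dict.contains_insert]
      simp [hc w' (List.mem_cons_of_mem _ hw')]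
    rw [ih _ hc', PySem.Dict.getD_insert, wsum_cons]
    by_cases h : t = w.2
    · simp [h, eq_comm]; ring
    · have h' : ¬ w.2 = t := fun e => h e.symm
      simp [h, h']

-- the initial dict of get_topic_distribution_in_list
theorem d0A_spec (t : Int) (h0 : 0 ≤ t) (h1 : t < 20) :
    (pyTopics.foldl (fun d t => d.insert t (0 : Int)) PySem.Dict.empty).getD t 0 = 0
    ∧ (pyTopics.foldl (fun d t => d.insert t (0 : Int)) PySem.Dict.empty).contains t = true := by
  interval_cases t <;> exact ⟨by decide, by decide⟩

theorem getTopicDistA_getD (doc : List ((Int × Int) × Int))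
    (hdoc : ∀ w ∈ doc, 0 ≤ w.2 ∧ w.2 < 20) (t : Int) (h0 : 0 ≤ t) (h1 : t < 20) :
    (getTopicDistA doc).getD t 0 = wsum doc t := by
  unfold getTopicDistA
  rw [foldA_getD doc _ (fun w hw => (d0A_spec w.2 (hdoc w hw).1 (hdoc w hw).2).2) t,
    (d0A_spec t h0 h1).1, zero_add]

-- one max?-step over a cons pair list
theorem max?_cons_cons (key : Int × Int → Int) (x y : Int × Int) (ys : List (Int × Int)) :
    PySem.List.max? (x :: y :: ys) key
    = PySem.List.max? ((if key x < key y then y else x) :: ys) key := by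
  unfold PySem.List.max?
  simp only [List.foldl_cons]
  congr 1
  by_cases h : key x < key y <;> simp [h]

-- Python max(key=itemgetter(1)) on the (t, weight) list IS B's first-max linear scan
theorem max?_scan (f : Int → Int) : ∀ (l : List Int) (p : Int × Int),
    PySem.List.max? (p :: l.map (fun t => (t, f t))) (fun q => q.2)
    = some (l.foldl (fun b t => if f t > b.2 then (t, f t) else b) p) := by
  intro l
  induction l with
  | nil => intro p; rfl
  | cons t l ih =>
    intro p
    rw [List.map_cons, max?_cons_cons, ih, List.foldl_cons]

-- fold congruence for the argmax scan
theorem scan_congr (fA fB : Int → Int) (l : List Int) (h : ∀ t ∈ l, fA t = fB t) :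
    ∀ (p : Int × Int),
      l.foldl (fun b t => if fA t > b.2 then (t, fA t) else b) p
      = l.foldl (fun b t => if fB t > b.2 then (t, fB t) else b) p := by
  induction l with
  | nil => intro p; rfl
  | cons t l ih =>
    intro p
    simp only [List.foldl_cons, h t (List.mem_cons_self)]
    exact ih (fun t' ht' => h t' (List.mem_cons_of_mem _ ht')) _

-- the two weight expressions agree: A's per-word recomputations equal B's precomputed dicts
theorem weight_eq (docs : List (List ((Int × Int) × Int))) (doc : List ((Int × Int) × Int))
    (hdoc : ∀ w ∈ doc, 0 ≤ w.2 ∧ w.2 < 20)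
    (hflat : ∀ w ∈ docs.flatten, 0 ≤ w.2 ∧ w.2 < 20)
    (x t : Int) (h0 : 0 ≤ t) (h1 : t < 20) :
    ((getTopicDistA doc).getD t 0 + 1)
      * ((getTopicDistA (List.filter (fun item => item.1.1 == x) docs.flatten)).getD t 0 + 1)
    = ((List.foldl (fun d w => d.insert w.2 (d.getD w.2 0 + w.1.2)) PySem.Dict.empty doc).getD t 0 + 1)
      * ((List.foldl (fun d doc => List.foldl (fun d w => d.insert (w.1.1, w.2) (d.getD (w.1.1, w.2) 0 + w.1.2)) d doc) PySem.Dict.empty docs).getD (x, t) 0 + 1) := by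
  have hfil : ∀ w ∈ List.filter (fun item => item.1.1 == x) docs.flatten, 0 ≤ w.2 ∧ w.2 < 20 :=
    fun w hw => hflat w (List.mem_of_mem_filter hw)
  rw [getTopicDistA_getD doc hdoc t h0 h1, getTopicDistA_getD _ hfil t h0 h1,
    foldB_getD, ← List.foldl_flatten, foldC_getD]
  have e1 : (PySem.Dict.empty : PySem.Dict Int Int).getD t 0 = 0 := rfl
  have e2 : (PySem.Dict.empty : PySem.Dict (Int × Int) Int).getD (x, t) 0 = 0 := rfl
  rw [e1, e2, zero_add, zero_add]

-- Python max(..., key=itemgetter(1)) over the 20 (t, f t) pairs IS the linear first-max scan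
theorem max?_pyTopics (f : Int → Int) :
    PySem.List.max? (List.map (fun t => (t, f t)) pyTopics) (fun p => p.2)
    = some (List.foldl (fun (b : Int × Int) tt => if f tt > b.2 then (tt, f tt) else b)
        (0, f 0) (PySem.List.pyRange 1 20)) := by
  have hc : pyTopics = 0 :: PySem.List.pyRange 1 20 := by decide
  rw [hc, List.map_cons]
  exact max?_scan f (PySem.List.pyRange 1 20) (0, f 0)

-- A's inner fold, with any weight function fW equal on 0..19 to B's gW, is B's map
theorem inner_general (fW gW : Int → Int → Int)
    (hfg : ∀ x t, 0 ≤ t → t < 20 → fW x t = gW x t) (doc : List ((Int × Int) × Int)) :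
    List.foldl (fun sublist word =>
        match PySem.List.max? (List.map (fun t => (t, fW word.1.1 t)) pyTopics) (fun p => p.2) with
        | some ts => sublist ++ [(word.1, ts.1)]
        | none => sublist) [] doc
    = List.map (fun w => (w.1,
        (List.foldl (fun (b : Int × Int) tt => if gW w.1.1 tt > b.2 then (tt, gW w.1.1 tt) else b)
          (0, gW w.1.1 0) (PySem.List.pyRange 1 20)).1)) doc := by
  have hmax : ∀ (x : Int),
      PySem.List.max? (List.map (fun t => (t, fW x t)) pyTopics) (fun p => p.2)
      = some (List.foldl (fun (b : Int × Int) tt => if gW x tt > b.2 then (tt, gW x tt) else b)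
          (0, gW x 0) (PySem.List.pyRange 1 20)) := by
    intro x
    rw [max?_pyTopics (fW x),
      scan_congr (fW x) (gW x) (PySem.List.pyRange 1 20)
        (fun t ht => by
          have hb := PySem.List.mem_pyRange_one.mp ht
          exact hfg x t (by omega) (by omega)),
      hfg x 0 (by norm_num) (by norm_num)]
  rw [PySem.List.foldl_congr_mem doc _
      (fun sublist w => sublist ++ [(w.1,
        (List.foldl (fun (b : Int × Int) tt => if gW w.1.1 tt > b.2 then (tt, gW w.1.1 tt) else b)
          (0, gW w.1.1 0) (PySem.List.pyRange 1 20)).1)]) []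
      (fun acc w _ => by rw [hmax w.1.1]),
    PySem.List.foldl_append_singleton_eq_map, List.nil_append]

-- ===== VERDICT (by name: the statement is the Claim_ definition above) =====
theorem sort_topics_spec : Claim_equal_sort_topics := by
  intro docs _hdom hpre
  unfold Spec_sort_topics sort_topics sort_topics_alt
  have hflat : ∀ w ∈ docs.flatten, 0 ≤ w.2 ∧ w.2 < 20 := by
    intro w hw
    obtain ⟨doc, hd, hww⟩ := List.mem_flatten.mp hw
    exact hpre doc hd w hww
  simp only [PySem.List.foldl_append_singleton_eq_map, List.nil_append]
  apply List.map_congr_left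
  intro doc hdmem
  exact inner_general
    (fun x t => ((getTopicDistA doc).getD t 0 + 1)
      * ((getTopicDistA (List.filter (fun item => item.1.1 == x) docs.flatten)).getD t 0 + 1))
    (fun x t => ((List.foldl (fun d w => d.insert w.2 (d.getD w.2 0 + w.1.2)) PySem.Dict.empty doc).getD t 0 + 1)
      * ((List.foldl (fun d doc => List.foldl (fun d w => d.insert (w.1.1, w.2) (d.getD (w.1.1, w.2) 0 + w.1.2)) d doc) PySem.Dict.empty docs).getD (x, t) 0 + 1))
    (fun x t h0 h1 => weight_eq docs doc (hpre doc hdmem) hflat x t h0 h1) doc
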